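-- pv_equiv track=rewrite | github.com/shmyhero/data-process | aggregation/agg_spyvixhedge.py | get_parameter_list
-- ===== SOURCE A (Python) =====
-- def get_parameter_list(records, latest_date):
--     filtered_records = filter(lambda x: x[0] >= latest_date, records)
--     values = map(lambda x: x[1], filtered_records)
--     # fix the wrong data, the vix option data records is not correct on 20170823.
--     previous_value = None
--     fixed_values = []
--     for value in values:
--         if value is None:
--             value = previous_value
--         previous_value = value
--         fixed_values.append(value)
--     return fixed_values
-- ===== SOURCE B (Python) =====
-- def get_parameter_list(records, latest_date):
--     values = [x[1] for x in records if x[0] >= latest_date]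
--
--     def fill(i):
--         # walk backwards to the nearest non-None value at or before i
--         while i >= 0 and values[i] is None:
--             i -= 1
--         return values[i] if i >= 0 else None
--
--     return [fill(i) for i in range(len(values))]
-- ===== Notes on version B (the rewrite author's own statement) =====
-- stated objective: alternative
-- what changed: Replaces A's single stateful forward scan (carrying previous_value) with stateless per-index backward searches: each output position independently looks back to the nearest non-None filtered value, so no accumulator is threaded through the pass.
import Mathlib
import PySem

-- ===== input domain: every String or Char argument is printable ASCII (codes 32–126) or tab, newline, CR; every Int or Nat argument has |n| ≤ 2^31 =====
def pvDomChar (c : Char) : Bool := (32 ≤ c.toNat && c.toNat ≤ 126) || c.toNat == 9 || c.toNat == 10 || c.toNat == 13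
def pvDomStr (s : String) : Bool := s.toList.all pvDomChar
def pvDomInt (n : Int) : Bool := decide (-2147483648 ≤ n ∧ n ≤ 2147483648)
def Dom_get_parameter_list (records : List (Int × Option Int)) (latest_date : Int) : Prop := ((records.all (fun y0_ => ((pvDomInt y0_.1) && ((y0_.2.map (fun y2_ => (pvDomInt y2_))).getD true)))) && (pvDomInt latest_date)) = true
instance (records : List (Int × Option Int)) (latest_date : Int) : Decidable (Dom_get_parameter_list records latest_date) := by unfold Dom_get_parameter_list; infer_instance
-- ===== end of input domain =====

-- B replaces A's stateful forward scan with independent per-index backward searches for the nearest non-None value (alternative decomposition; O(n^2) worst case, not claimed faster).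
-- ===== PORT A =====
-- literal port of A: filter, map, then the explicit previous_value/fixed_values loop (a foldl over the same state)
def get_parameter_list (records : List (Int × Option Int)) (latest_date : Int) : List (Option Int) :=
  let filtered_records := records.filter (fun x => latest_date ≤ x.1)
  let values := filtered_records.map (fun x => x.2)
  (values.foldl
    (fun (st : Option Int × List (Option Int)) value =>
      let value := if value = none then st.1 else value
      (value, st.2 ++ [value]))
    (none, [])).2

-- ===== PORT B =====
-- B's fill(i): walk backwards from i until a non-None value is found (i < values.length at every call)
def pvFill (values : List (Option Int)) : Nat → Option Int
  | 0 => values.getD 0 none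
  | i+1 =>
    match values.getD (i+1) none with
    | some v => some v
    | none => pvFill values i

def get_parameter_list_alt (records : List (Int × Option Int)) (latest_date : Int) : List (Option Int) :=
  let values := (records.filter (fun x => latest_date ≤ x.1)).map (fun x => x.2)
  (List.range values.length).map (pvFill values)

-- ===== PRECONDITION & SPEC =====
def Spec_get_parameter_list (records : List (Int × Option Int)) (latest_date : Int) (out : List (Option Int)) : Prop := out = get_parameter_list_alt records latest_date
instance (records : List (Int × Option Int)) (latest_date : Int) (out : List (Option Int)) : Decidable (Spec_get_parameter_list records latest_date out) := by unfold Spec_get_parameter_list; infer_instance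

-- ===== CLAIM (what is proved, stated in full; the proofs are below) =====
def Claim_equal_get_parameter_list : Prop := ∀ (records : List (Int × Option Int)) (latest_date : Int), Dom_get_parameter_list records latest_date → Spec_get_parameter_list records latest_date (get_parameter_list records latest_date)

-- ===== LEMMAS AND PROOFS =====

-- proof-side model of A's loop: a forward scan keeping the previous value
def pvScanGo (prev : Option Int) : List (Option Int) → List (Option Int)
  | [] => []
  | v :: vs => let a := if v = none then prev else v; a :: pvScanGo a vs

-- A's foldl accumulates exactly the scan
theorem pv_foldl_scanGo (l : List (Option Int)) : ∀ (prev : Option Int) (acc : List (Option Int)),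
    (l.foldl
      (fun (st : Option Int × List (Option Int)) value =>
        let value := if value = none then st.1 else value
        (value, st.2 ++ [value]))
      (prev, acc)).2
    = acc ++ pvScanGo prev l := by
  induction l with
  | nil => intro prev acc; simp [pvScanGo]
  | cons v vs ih => intro prev acc; simp [List.foldl, pvScanGo, ih]

-- the backward search at the head position returns the head
theorem pvFill_zero (v : Option Int) (vs : List (Option Int)) : pvFill (v :: vs) 0 = v := by
  cases v <;> simp [pvFill]

-- shift: one step of the scan absorbed into the list
theorem pvFill_shift (v v' : Option Int) (vs : List (Option Int)) (i : Nat) :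
    pvFill (v :: v' :: vs) (i + 1) = pvFill ((if v' = none then v else v') :: vs) i := by
  induction i with
  | zero =>
    cases v' <;> simp [pvFill]
  | succ j ih =>
    show pvFill (v :: v' :: vs) (j + 2) = pvFill ((if v' = none then v else v') :: vs) (j + 1)
    conv_lhs => rw [pvFill]
    conv_rhs => rw [pvFill]
    simp only [List.getD_cons_succ, ih]

-- main: the scan equals the per-index backward searches
theorem pv_scan_eq_fill (vs : List (Option Int)) : ∀ (v : Option Int),
    v :: pvScanGo v vs = (List.range (vs.length + 1)).map (pvFill (v :: vs)) := by
  induction vs with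
  | nil => intro v; simp [pvScanGo, pvFill_zero]
  | cons v' vs ih =>
    intro v
    simp only [List.length_cons]
    have h1 : ∀ i ∈ List.range (vs.length + 1),
        (pvFill (v :: v' :: vs) ∘ Nat.succ) i = pvFill ((if v' = none then v else v') :: vs) i :=
      fun i _ => pvFill_shift v v' vs i
    calc v :: pvScanGo v (v' :: vs)
        = v :: (if v' = none then v else v') :: pvScanGo (if v' = none then v else v') vs := by
          simp [pvScanGo]
      _ = v :: (List.range (vs.length + 1)).map (pvFill ((if v' = none then v else v') :: vs)) := by
          rw [← ih]
      _ = v :: (List.range (vs.length + 1)).map (pvFill (v :: v' :: vs) ∘ Nat.succ) := by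
          rw [List.map_congr_left h1]
      _ = (List.range (vs.length + 1 + 1)).map (pvFill (v :: v' :: vs)) := by
          conv_rhs => rw [List.range_succ_eq_map, List.map_cons, List.map_map]
          rw [pvFill_zero]

-- ===== VERDICT (by name: the statement is the Claim_ definition above) =====
theorem get_parameter_list_spec : Claim_equal_get_parameter_list := by
  intro records latest_date _
  unfold Spec_get_parameter_list get_parameter_list get_parameter_list_alt
  rw [pv_foldl_scanGo]
  cases h : (records.filter (fun x => latest_date ≤ x.1)).map (fun x => x.2) with
  | nil => simp [pvScanGo]
  | cons v vs =>
    simp only [List.nil_append, List.length_cons]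
    have hv : (if v = none then (none : Option Int) else v) = v := by cases v <;> simp
    calc pvScanGo none (v :: vs) = v :: pvScanGo v vs := by simp [pvScanGo, hv]
      _ = (List.range (vs.length + 1)).map (pvFill (v :: vs)) := pv_scan_eq_fill vs v
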